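-- pv_equiv track=rewrite | github.com/vudinhduy26/Codewars-py | Pack-Some-Chocolates.py | make_chocolates
-- ===== SOURCE A (Python) =====
-- def make_chocolates(small, big, goal):
--     arr = []
--     for i in range(0,small+1):
--         for j in range(0,big+1):
--             if i*2+j*5 == goal:
--                 arr.append(i)
--     if len(arr) != 0:
--         return arr[0]
--     return -1
-- ===== SOURCE B (Python) =====
-- def make_chocolates(small, big, goal):
--     for i in range(small + 1):
--         r = goal - 2 * i
--         if r >= 0 and r % 5 == 0 and r // 5 <= big:
--             return i
--     return -1
-- ===== Notes on version B (the rewrite author's own statement) =====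
-- stated objective: faster
-- what changed: B replaces A's nested scan over all (i, j) pairs by a single pass over i that tests divisibility of goal-2*i by 5 and bounds the quotient by big, returning the first hit immediately.
import Mathlib
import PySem

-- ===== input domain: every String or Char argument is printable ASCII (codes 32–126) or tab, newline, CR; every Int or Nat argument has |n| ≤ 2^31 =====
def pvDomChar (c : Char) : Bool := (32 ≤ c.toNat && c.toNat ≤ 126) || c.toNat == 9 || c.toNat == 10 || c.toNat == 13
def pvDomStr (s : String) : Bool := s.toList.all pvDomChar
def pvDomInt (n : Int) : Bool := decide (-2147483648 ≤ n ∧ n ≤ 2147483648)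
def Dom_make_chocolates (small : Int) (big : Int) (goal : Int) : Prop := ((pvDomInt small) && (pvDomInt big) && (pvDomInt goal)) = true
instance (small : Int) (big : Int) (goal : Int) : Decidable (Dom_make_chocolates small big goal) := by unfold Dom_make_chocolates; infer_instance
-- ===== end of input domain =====

-- B replaces A's O(small*big) double scan by a single pass over i that checks
-- divisibility of goal-2i by 5 and the quotient bound directly (asymptotically faster).

-- ===== PORT A =====
def make_chocolates (small : Int) (big : Int) (goal : Int) : Int :=
  let arr : List Int :=
    (PySem.List.pyRange 0 (small+1) 1).foldl (fun arr i =>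
      (PySem.List.pyRange 0 (big+1) 1).foldl (fun arr j =>
        if i*2 + j*5 == goal then arr ++ [i] else arr) arr) []
  if arr.length ≠ 0 then arr.headI else -1

-- ===== PORT B =====
-- the per-i test of Source B: r = goal - 2*i; r >= 0 and r % 5 == 0 and r // 5 <= big
def pvChk (big : Int) (goal : Int) (i : Int) : Bool :=
  decide (0 ≤ goal - 2*i) && (PySem.Int.mod (goal - 2*i) 5 == 0) &&
    decide (PySem.Int.floordiv (goal - 2*i) 5 ≤ big)

-- Source B's 'for i in range(small+1): if chk(i): return i / return -1' = first match or -1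
def make_chocolates_alt (small : Int) (big : Int) (goal : Int) : Int :=
  match (PySem.List.pyRange 0 (small+1) 1).find? (pvChk big goal) with
  | some i => i
  | none => -1

-- ===== PRECONDITION & SPEC =====
def Spec_make_chocolates (small : Int) (big : Int) (goal : Int) (out : Int) : Prop := out = make_chocolates_alt small big goal
instance (small : Int) (big : Int) (goal : Int) (out : Int) : Decidable (Spec_make_chocolates small big goal out) := by unfold Spec_make_chocolates; infer_instance

-- ===== CLAIM (what is proved, stated in full; the proofs are below) =====
def Claim_equal_make_chocolates : Prop := ∀ (small : Int) (big : Int) (goal : Int), Dom_make_chocolates small big goal → Spec_make_chocolates small big goal (make_chocolates small big goal)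

-- ===== LEMMAS AND PROOFS =====

-- the block A's inner loop contributes for a given i
def pvBlk (big : Int) (goal : Int) (i : Int) : List Int :=
  ((PySem.List.pyRange 0 (big+1) 1).filter (fun j => i*2 + j*5 == goal)).map (fun _ => i)

theorem pvBlk_elem (big goal i : Int) : ∀ x ∈ pvBlk big goal i, x = i := by
  intro x hx
  simp [pvBlk] at hx
  exact hx.2

-- nonemptiness of the block ↔ B's arithmetic test
theorem pvBlk_key (big goal i : Int) :
    pvBlk big goal i ≠ [] ↔ ∃ j, 0 ≤ j ∧ j < big+1 ∧ i*2 + j*5 = goal := by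
  simp only [pvBlk, ne_eq, List.map_eq_nil_iff, List.filter_eq_nil_iff,
    PySem.List.mem_pyRange_one, beq_iff_eq]
  push_neg
  constructor
  · rintro ⟨j, ⟨h1, h2⟩, h3⟩; exact ⟨j, h1, h2, h3⟩
  · rintro ⟨j, h1, h2, h3⟩; exact ⟨j, ⟨h1, h2⟩, h3⟩

-- nonemptiness of the block ↔ B's arithmetic test
theorem pvBlk_isEmpty (big goal i : Int) : (!(pvBlk big goal i).isEmpty) = pvChk big goal i := by
  have h5 : PySem.Int.mod (goal - 2*i) 5 = (goal - 2*i) % 5 :=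
    PySem.Int.mod_eq_emod_of_pos (a := goal - 2*i) (by norm_num : (0:Int) < 5)
  have hd : PySem.Int.floordiv (goal - 2*i) 5 = (goal - 2*i) / 5 :=
    PySem.Int.floordiv_eq_ediv_of_pos (a := goal - 2*i) (by norm_num : (0:Int) < 5)
  cases hb : (pvBlk big goal i).isEmpty with
  | false =>
    have hne : pvBlk big goal i ≠ [] := by simpa using hb
    obtain ⟨j, hj0, hjb, hjs⟩ := (pvBlk_key big goal i).mp hne
    have hc : pvChk big goal i = true := by
      simp only [pvChk, h5, hd, Bool.and_eq_true, decide_eq_true_eq, beq_iff_eq]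
      exact ⟨⟨by omega, by omega⟩, by omega⟩
    simp [hc]
  | true =>
    have hnil : pvBlk big goal i = [] := by simpa using hb
    simp only [Bool.not_true]
    symm
    rw [Bool.eq_false_iff]
    intro hc
    simp only [pvChk, h5, hd, Bool.and_eq_true, decide_eq_true_eq, beq_iff_eq] at hc
    exact (pvBlk_key big goal i).mpr ⟨(goal - 2*i) / 5, by omega, by omega, by omega⟩ hnil

-- A's inner loop = append the block
theorem pvInner (big goal i : Int) (acc : List Int) :
    (PySem.List.pyRange 0 (big+1) 1).foldl (fun arr j =>
        if i*2 + j*5 == goal then arr ++ [i] else arr) acc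
      = acc ++ pvBlk big goal i := by
  simpa [pvBlk] using
    PySem.List.foldl_append_if (l := PySem.List.pyRange 0 (big+1) 1)
      (p := fun j => i*2 + j*5 == goal) (f := fun _ => i) (acc := acc)

-- head of a concatenation of blocks whose elements are their index = first index with a nonempty block
theorem pvHead_flatMap (g : Int → List Int) (hg : ∀ i, ∀ x ∈ g i, x = i) :
    ∀ l : List Int, (l.flatMap g).head? = l.find? (fun i => !(g i).isEmpty) := by
  intro l
  induction l with
  | nil => simp
  | cons i t ih =>
    cases hgi : g i with
    | nil => simpa [List.flatMap_cons, hgi] using ih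
    | cons x xs =>
      have hx : x = i := hg i x (by simp [hgi])
      simp [List.flatMap_cons, hgi, hx]

theorem pvFind_congr (p q : Int → Bool) (h : ∀ x, p x = q x) :
    ∀ l : List Int, l.find? p = l.find? q := by
  intro l
  induction l with
  | nil => rfl
  | cons a t ih => simp [List.find?, h a, ih]

-- ===== VERDICT (by name: the statement is the Claim_ definition above) =====
theorem make_chocolates_spec : Claim_equal_make_chocolates := by
  intro small big goal _
  unfold Spec_make_chocolates make_chocolates make_chocolates_alt
  have harr :
      (PySem.List.pyRange 0 (small+1) 1).foldl (fun arr i =>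
        (PySem.List.pyRange 0 (big+1) 1).foldl (fun arr j =>
          if i*2 + j*5 == goal then arr ++ [i] else arr) arr) ([] : List Int)
      = (PySem.List.pyRange 0 (small+1) 1).flatMap (pvBlk big goal) := by
    have := PySem.List.foldl_append_eq_flatMap (l := PySem.List.pyRange 0 (small+1) 1)
      (g := pvBlk big goal) (acc := ([] : List Int))
    simp only [List.nil_append] at this
    rw [← this]
    apply PySem.List.foldl_congr_mem
    intro acc i _
    exact pvInner big goal i acc
  rw [harr]
  have hfind :
      (PySem.List.pyRange 0 (small+1) 1).find? (pvChk big goal)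
      = (PySem.List.pyRange 0 (small+1) 1).find? (fun i => !(pvBlk big goal i).isEmpty) :=
    pvFind_congr _ _ (fun i => (pvBlk_isEmpty big goal i).symm) _
  rw [hfind, ← pvHead_flatMap (pvBlk big goal) (pvBlk_elem big goal)]
  cases h : ((PySem.List.pyRange 0 (small+1) 1).flatMap (pvBlk big goal)) with
  | nil => simp
  | cons x xs => simp
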